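-- pv_equiv track=rewrite | github.com/Peter200lx/advent-of-code | 2019/day04.py | vp2
-- ===== SOURCE A (Python) =====
-- from collections import Counter
--
-- def vp2(code):
--     if len(code) != 6:
--         return False
--     c = Counter(code)
--     prev = 0
--     for char in code:
--         cur = int(char)
--         if cur < prev:
--             return False
--         prev = cur
--     return any(v == 2 for k, v in c.items())
-- ===== SOURCE B (Python) =====
-- def vp2(code):
--     if len(code) != 6 or not code.isdigit():
--         return False
--     run = 1
--     found = False
--     for a, b in zip(code, code[1:]):
--         if b < a:
--             return False
--         if b == a:
--             run += 1
--         else: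
--             if run == 2:
--                 found = True
--             run = 1
--     return found or run == 2
-- ===== Notes on version B (the rewrite author's own statement) =====
-- stated objective: alternative
-- what changed: Replaced A's three passes (Counter build, per-char int() ordering scan, any() over counts) by a single scan over adjacent character pairs that checks ordering by character comparison and detects an exactly-double digit with a run-length accumulator, with isdigit() replacing per-character int() conversion.
-- crash fix: On length-6 strings whose maximal digit prefix is non-decreasing and shorter than 6, A raises ValueError at the first non-digit character while B returns False. — e.g. on vp2("12a456"): A raises ValueError, B returns false
import Mathlib
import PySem

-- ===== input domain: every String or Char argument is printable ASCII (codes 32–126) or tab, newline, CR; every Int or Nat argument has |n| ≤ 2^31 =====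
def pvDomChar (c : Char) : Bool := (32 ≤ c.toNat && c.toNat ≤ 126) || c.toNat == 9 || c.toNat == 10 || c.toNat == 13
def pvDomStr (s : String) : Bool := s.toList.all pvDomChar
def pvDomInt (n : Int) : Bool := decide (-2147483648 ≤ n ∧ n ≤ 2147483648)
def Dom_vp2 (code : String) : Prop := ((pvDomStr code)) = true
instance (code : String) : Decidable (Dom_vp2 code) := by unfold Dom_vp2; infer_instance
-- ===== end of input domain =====

-- B replaces A's three passes (Counter build, int()-based ordering scan, any() over counts) by one
-- adjacent-pair scan with a run-length accumulator; return-value equivalence only (no mutation in either).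

-- ===== PORT A =====
-- the for-loop of A: none = ValueError from int(char); some false = early 'return False'; some true = loop completed
def vp2Loop : List Char → Int → Option Bool
  | [], _ => some true
  | ch :: rest, prev =>
    match PySem.Int.ofChars? [ch] with
    | none => none
    | some cur => if cur < prev then some false else vp2Loop rest cur

def vp2 (code : String) : Bool :=
  if code.toList.length ≠ 6 then false
  else
    let c := PySem.Dict.counter code.toList
    match vp2Loop code.toList 0 with
    | none => false          -- ValueError: excluded by Pre_vp2
    | some false => false
    | some true => c.items.any (fun kv => decide (kv.2 = 2))

-- ===== PORT B =====
-- B's for-loop over zip(code, code[1:]) with run-length state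
def vp2AltLoop : List (Char × Char) → Int → Bool → Bool
  | [], run, found => found || decide (run = 2)
  | (a, b) :: rest, run, found =>
    if b < a then false
    else if b == a then vp2AltLoop rest (run + 1) found
    else vp2AltLoop rest 1 (found || decide (run = 2))

def vp2_alt (code : String) : Bool :=
  if code.toList.length ≠ 6 || !(PySem.Chars.strIsdigit code.toList) then false
  else vp2AltLoop (code.toList.zip code.toList.tail) 1 false

-- ===== PRECONDITION & SPEC =====
-- Pre_vp2 excludes exactly the inputs where A raises ValueError: length-6 strings whose maximal
-- digit prefix is shorter than 6 and non-decreasing, so A's loop reaches int() of a non-digit char.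
def Pre_vp2 (code : String) : Prop :=
  code.toList.length = 6 →
    (code.toList.takeWhile PySem.Chars.isdigit).length = 6 ∨
    ¬ (code.toList.takeWhile PySem.Chars.isdigit).Pairwise (· ≤ ·)
instance (code : String) : Decidable (Pre_vp2 code) := by unfold Pre_vp2; infer_instance

def pvWitness_vp2 : String := "122345"

-- On length-6 strings whose digit prefix is non-decreasing and shorter than 6, A raises ValueError
-- at the first non-digit character while B returns False (the code is not a valid all-digit code).
def Raises_vp2 (code : String) : Prop :=
  code.toList.length = 6 ∧
  (code.toList.takeWhile PySem.Chars.isdigit).length ≠ 6 ∧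
  (code.toList.takeWhile PySem.Chars.isdigit).Pairwise (· ≤ ·)
instance (code : String) : Decidable (Raises_vp2 code) := by unfold Raises_vp2; infer_instance

def pvRaiseWitness_vp2 : String := "12a456"
def pvRaiseWitnessOut_vp2 : Bool := false

def Spec_vp2 (code : String) (out : Bool) : Prop := out = vp2_alt code
instance (code : String) (out : Bool) : Decidable (Spec_vp2 code out) := by unfold Spec_vp2; infer_instance

-- ===== CLAIM (what is proved, stated in full; the proofs are below) =====
def Claim_equal_vp2 : Prop := ∀ (code : String), Dom_vp2 code → Pre_vp2 code → Spec_vp2 code (vp2 code)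
def Claim_raises_vp2 : Prop := (∀ (code : String), Dom_vp2 code → Raises_vp2 code → ¬ Pre_vp2 code) ∧ (Dom_vp2 (pvRaiseWitness_vp2) ∧ Raises_vp2 (pvRaiseWitness_vp2) ∧ vp2_alt (pvRaiseWitness_vp2) = pvRaiseWitnessOut_vp2)

-- ===== LEMMAS AND PROOFS =====

-- int value of a digit character
def digitVal (c : Char) : Int := (c.toNat : Int) - 48

-- the non-decreasing check A's loop performs, as a pure function of prev and the digit values
def chk : Int → List Char → Bool
  | _, [] => true
  | prev, c :: t => decide (prev ≤ digitVal c) && chk (digitVal c) t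

lemma char_le_iff (a b : Char) : a ≤ b ↔ a.toNat ≤ b.toNat := Iff.rfl

lemma isdigit_toNat (c : Char) (h : PySem.Chars.isdigit c = true) :
    48 ≤ c.toNat ∧ c.toNat ≤ 57 := by
  simp [PySem.Chars.isdigit, char_le_iff] at h
  exact ⟨h.1, h.2⟩

lemma ofChars_fin128 : ∀ n : Fin 128, PySem.Int.ofChars? [Char.ofNat n.val] =
    (if PySem.Chars.isdigit (Char.ofNat n.val) then some ((n.val : Int) - 48) else none) := by
  decide

lemma ofChars_single_ascii (c : Char) (h : pvDomChar c = true) :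
    PySem.Int.ofChars? [c] =
      if PySem.Chars.isdigit c then some (digitVal c) else none := by
  have hlt : c.toNat < 128 := by
    simp [pvDomChar] at h
    omega
  have := ofChars_fin128 ⟨c.toNat, hlt⟩
  simpa [Char.ofNat_toNat, digitVal] using this

lemma aLoop_digits (l : List Char) (h : ∀ c ∈ l, pvDomChar c = true ∧ PySem.Chars.isdigit c = true) :
    ∀ prev, vp2Loop l prev = some (chk prev l) := by
  induction l with
  | nil => intro prev; simp [vp2Loop, chk]
  | cons c t ih =>
    intro prev
    have hc := h c (List.mem_cons_self ..)
    rw [vp2Loop, ofChars_single_ascii c hc.1, hc.2]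
    simp only [if_true, chk]
    by_cases hlt : digitVal c < prev
    · simp [hlt, not_le.mpr hlt]
    · simp [hlt, not_lt.mp hlt, ih (fun c hm => h c (List.mem_cons_of_mem _ hm))]

lemma chk_tail (l : List Char) : ∀ a,
    chk (digitVal a) l = decide ((a :: l).Pairwise (· ≤ ·)) := by
  induction l with
  | nil => intro a; simp [chk]
  | cons b t ih =>
    intro a
    rw [chk, ih b]
    have : digitVal a ≤ digitVal b ↔ a ≤ b := by
      simp [digitVal, char_le_iff]
    rcases Decidable.em (a ≤ b) with hab | hab
    · have h1 : decide (digitVal a ≤ digitVal b) = true := by simp [this, hab]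
      rw [h1, Bool.true_and]
      apply decide_eq_decide.mpr
      constructor
      · intro hp
        refine List.pairwise_cons.mpr ⟨?_, hp⟩
        intro c hc
        rcases List.mem_cons.mp hc with hc | hc
        · exact hc ▸ hab
        · exact le_trans hab ((List.pairwise_cons.mp hp).1 c hc)
      · exact fun hp => (List.pairwise_cons.mp hp).2
    · have h1 : decide (digitVal a ≤ digitVal b) = false := by simp [this, hab]
      rw [h1, Bool.false_and]
      symm
      simp only [decide_eq_false_iff_not]
      intro hp
      exact hab ((List.pairwise_cons.mp hp).1 b (List.mem_cons_self ..))

lemma chk_zero (l : List Char) (h : ∀ c ∈ l, PySem.Chars.isdigit c = true) :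
    chk 0 l = decide (l.Pairwise (· ≤ ·)) := by
  cases l with
  | nil => simp [chk]
  | cons a t =>
    rw [chk, chk_tail t a]
    have h48 := isdigit_toNat a (h a (List.mem_cons_self ..))
    have : (0 : Int) ≤ digitVal a := by simp [digitVal]; omega
    simp [this]

lemma aLoop_break (p : List Char)
    (h : ∀ c ∈ p, pvDomChar c = true ∧ PySem.Chars.isdigit c = true)
    (hc : ¬ p.Pairwise (· ≤ ·)) :
    ∀ rest prev, vp2Loop (p ++ rest) prev = some false := by
  induction p with
  | nil => exact absurd List.Pairwise.nil hc
  | cons a q ih =>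
    intro rest prev
    have ha := h a (List.mem_cons_self ..)
    rw [List.cons_append, vp2Loop, ofChars_single_ascii a ha.1, ha.2]
    simp only [if_true]
    by_cases hlt : digitVal a < prev
    · simp [hlt]
    · simp only [hlt, if_false]
      cases q with
      | nil => exact absurd (List.pairwise_singleton _ _) hc
      | cons b t =>
        by_cases hq : (b :: t).Pairwise (· ≤ ·)
        · have hab : ¬ a ≤ b := by
            intro hab
            apply hc
            refine List.pairwise_cons.mpr ⟨?_, hq⟩
            intro c hcm
            rcases List.mem_cons.mp hcm with hcm | hcm
            · exact hcm ▸ hab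
            · exact le_trans hab ((List.pairwise_cons.mp hq).1 c hcm)
          have hb := h b (by simp)
          have hba : digitVal b < digitVal a := by
            simp only [char_le_iff, not_le] at hab
            simp [digitVal]; omega
          rw [List.cons_append, vp2Loop, ofChars_single_ascii b hb.1, hb.2]
          simp [hba]
        · exact ih (fun c hm => h c (List.mem_cons_of_mem _ hm)) hq rest (digitVal a)

lemma bLoop_break (l : List Char) :
    ∀ a run found, ¬ (a :: l).Pairwise (· ≤ ·) →
      vp2AltLoop ((a :: l).zip l) run found = false := by
  induction l with
  | nil => intro a run found hns; exact absurd (List.pairwise_singleton _ _) hns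
  | cons b t ih =>
    intro a run found hns
    rw [List.zip_cons_cons, vp2AltLoop]
    by_cases hba : b < a
    · simp [hba]
    · have hab : a ≤ b := not_lt.mp hba
      have hns' : ¬ (b :: t).Pairwise (· ≤ ·) := by
        intro hq
        apply hns
        refine List.pairwise_cons.mpr ⟨?_, hq⟩
        intro c hcm
        rcases List.mem_cons.mp hcm with hcm | hcm
        · exact hcm ▸ hab
        · exact le_trans hab ((List.pairwise_cons.mp hq).1 c hcm)
      simp only [hba, if_false]
      by_cases heq : b == a
      · simp only [heq, if_true]; exact ih b (run + 1) found hns'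
      · simp only [heq, Bool.false_eq_true, if_false]
        exact ih b 1 (found || decide (run = 2)) hns'

lemma bLoop_inv (l : List Char) :
    ∀ a run found, (a :: l).Pairwise (· ≤ ·) →
      vp2AltLoop ((a :: l).zip l) run found =
        (found || decide (run + l.count a = 2) || decide (∃ c ∈ l, c ≠ a ∧ l.count c = 2)) := by
  induction l with
  | nil => intro a run found _; simp [vp2AltLoop]
  | cons b t ih =>
    intro a run found hp
    have hab : a ≤ b := (List.pairwise_cons.mp hp).1 b (List.mem_cons_self ..)
    have hp' : (b :: t).Pairwise (· ≤ ·) := (List.pairwise_cons.mp hp).2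
    have hba : ¬ b < a := not_lt.mpr hab
    rw [List.zip_cons_cons, vp2AltLoop]
    simp only [hba, if_false]
    by_cases heq : b = a
    · subst heq
      simp only [beq_self_eq_true, if_true]
      rw [ih b (run + 1) found hp']
      have e1 : decide (run + 1 + (t.count b : Int) = 2) = decide (run + ((b :: t).count b : Int) = 2) := by
        apply decide_eq_decide.mpr
        rw [List.count_cons_self]
        push_cast
        omega
      have e2 : decide (∃ c ∈ t, c ≠ b ∧ t.count c = 2) = decide (∃ c ∈ b :: t, c ≠ b ∧ (b :: t).count c = 2) := by
        apply decide_eq_decide.mpr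
        constructor
        · rintro ⟨c, hm, hne, hcnt⟩
          exact ⟨c, List.mem_cons_of_mem _ hm, hne, by rw [List.count_cons_of_ne hne.symm]; exact hcnt⟩
        · rintro ⟨c, hm, hne, hcnt⟩
          rcases List.mem_cons.mp hm with hm | hm
          · exact absurd hm hne
          · exact ⟨c, hm, hne, by rw [List.count_cons_of_ne hne.symm] at hcnt; exact hcnt⟩
      rw [e1, e2]
    · have hbeq : (b == a) = false := beq_eq_false_iff_ne.mpr heq
      have halt : a < b := hab.lt_of_ne (fun h => heq h.symm)
      have hnotin : a ∉ b :: t := by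
        intro hm
        rcases List.mem_cons.mp hm with hm | hm
        · exact heq hm.symm
        · exact absurd ((List.pairwise_cons.mp hp').1 a hm) (not_le.mpr halt)
      simp only [hbeq, Bool.false_eq_true, if_false]
      rw [ih b 1 (found || decide (run = 2)) hp']
      have e1 : decide (run + ((b :: t).count a : Int) = 2) = decide (run = 2) := by
        apply decide_eq_decide.mpr
        rw [List.count_eq_zero.mpr hnotin]
        push_cast
        omega
      have e2 : decide (∃ c ∈ b :: t, c ≠ a ∧ (b :: t).count c = 2) =
          (decide (1 + (t.count b : Int) = 2) || decide (∃ c ∈ t, c ≠ b ∧ t.count c = 2)) := by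
        rw [← Bool.decide_or]
        apply decide_eq_decide.mpr
        constructor
        · rintro ⟨c, hm, hne, hcnt⟩
          rcases List.mem_cons.mp hm with hm | hm
          · subst hm
            rw [List.count_cons_self] at hcnt
            left; omega
          · by_cases hcb : c = b
            · subst hcb
              rw [List.count_cons_self] at hcnt
              left; omega
            · rw [List.count_cons_of_ne (Ne.symm hcb)] at hcnt
              exact Or.inr ⟨c, hm, hcb, hcnt⟩
        · rintro (h1 | ⟨c, hm, hne, hcnt⟩)
          · refine ⟨b, List.mem_cons_self .., fun h => heq h, ?_⟩
            rw [List.count_cons_self]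
            omega
          · refine ⟨c, List.mem_cons_of_mem _ hm, fun h => hnotin (h ▸ List.mem_cons_of_mem _ hm), ?_⟩
            rw [List.count_cons_of_ne hne.symm]
            exact hcnt
      rw [e1, e2, Bool.or_assoc]

lemma counter_any (l : List Char) :
    (PySem.Dict.counter l).items.any (fun kv => decide (kv.2 = 2)) =
      decide (∃ c ∈ l, l.count c = 2) := by
  rw [PySem.Dict.items_counter, List.any_map]
  apply Bool.eq_iff_iff.mpr
  simp only [List.any_eq_true, Function.comp, decide_eq_true_eq, PySem.Set.mem_ofList]
  constructor
  · rintro ⟨c, hm, hc⟩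
    exact ⟨c, hm, by exact_mod_cast hc⟩
  · rintro ⟨c, hm, hc⟩
    exact ⟨c, hm, by exact_mod_cast hc⟩

-- ===== VERDICT (by name: the statement is the Claim_ definition above) =====
-- the common existential rearrangement at the head of the list
lemma exists_count_head (a : Char) (t : List Char) :
    decide (∃ c ∈ a :: t, (a :: t).count c = 2) =
      (decide (1 + (t.count a : Int) = 2) || decide (∃ c ∈ t, c ≠ a ∧ t.count c = 2)) := by
  rw [← Bool.decide_or]
  apply decide_eq_decide.mpr
  constructor
  · rintro ⟨c, hm, hcnt⟩
    rcases List.mem_cons.mp hm with hm | hm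
    · subst hm
      rw [List.count_cons_self] at hcnt
      left; omega
    · by_cases hca : c = a
      · subst hca
        rw [List.count_cons_self] at hcnt
        left; omega
      · rw [List.count_cons_of_ne (Ne.symm hca)] at hcnt
        exact Or.inr ⟨c, hm, hca, hcnt⟩
  · rintro (h1 | ⟨c, hm, hne, hcnt⟩)
    · refine ⟨a, List.mem_cons_self .., ?_⟩
      rw [List.count_cons_self]
      omega
    · refine ⟨c, List.mem_cons_of_mem _ hm, ?_⟩
      rw [List.count_cons_of_ne hne.symm]
      exact hcnt

theorem vp2_spec : Claim_equal_vp2 := by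
  intro code hdom hpre
  unfold Spec_vp2 vp2 vp2_alt
  have hdom' : ∀ c ∈ code.toList, pvDomChar c = true := by
    intro c hc
    exact List.all_eq_true.mp hdom c hc
  by_cases h6 : code.toList.length = 6
  · simp only [h6, ne_eq, not_true_eq_false, if_false, decide_false, Bool.false_or]
    by_cases hdig : ∀ c ∈ code.toList, PySem.Chars.isdigit c = true
    · have hsd : PySem.Chars.strIsdigit code.toList = true := by
        simp only [PySem.Chars.strIsdigit, Bool.and_eq_true, Bool.not_eq_true', List.isEmpty_eq_false_iff,
          List.all_eq_true]
        exact ⟨by intro h; rw [h] at h6; simp at h6, hdig⟩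
      rw [aLoop_digits code.toList (fun c hc => ⟨hdom' c hc, hdig c hc⟩) 0,
        chk_zero code.toList hdig, hsd]
      simp only [Bool.not_true]
      by_cases hsort : code.toList.Pairwise (· ≤ ·)
      · simp only [hsort, decide_true]
        cases hcl : code.toList with
        | nil => rw [hcl] at h6; simp at h6
        | cons a t =>
          rw [hcl] at hsort
          simp only [counter_any, List.tail_cons]
          rw [bLoop_inv t a 1 false hsort, exists_count_head]
          simp
      · simp only [hsort, decide_false]
        cases hcl : code.toList with
        | nil => rw [hcl] at h6; simp at h6
        | cons a t =>
          rw [hcl] at hsort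
          simp only [List.tail_cons]
          rw [bLoop_break t a 1 false hsort]
          simp
    · -- a non-digit is present: Pre_vp2 says the digit prefix has a decrease, so A returns False early
      have htw : (code.toList.takeWhile PySem.Chars.isdigit).length ≠ 6 := by
        intro hlen
        apply hdig
        have hpr : code.toList.takeWhile PySem.Chars.isdigit = code.toList :=
          (List.takeWhile_prefix _).eq_of_length (by rw [hlen, h6])
        intro c hc
        exact List.mem_takeWhile_imp (hpr ▸ hc)
      have hpw := (hpre h6).resolve_left htw
      have hsd : PySem.Chars.strIsdigit code.toList = false := by
        simp only [PySem.Chars.strIsdigit, Bool.and_eq_false_iff, List.all_eq_false]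
        right
        push Not at hdig
        rcases hdig with ⟨c, hc, hnd⟩
        exact ⟨c, hc, by simp [hnd]⟩
      conv_lhs => rw [← List.takeWhile_append_dropWhile (p := PySem.Chars.isdigit) (l := code.toList)]
      rw [aLoop_break (code.toList.takeWhile PySem.Chars.isdigit)
        (fun c hc => ⟨hdom' c ((List.takeWhile_prefix _).subset hc), List.mem_takeWhile_imp hc⟩) hpw
        (code.toList.dropWhile PySem.Chars.isdigit) 0]
      rw [hsd]
      simp
  · have h6' : ¬ code.length = 6 := by simpa using h6
    simp [h6']

@[simp] theorem vp2_raises : Claim_raises_vp2 := by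
  unfold Claim_raises_vp2
  constructor
  · intro code _ hr hp
    rcases hr with ⟨h6, hne, hpw⟩
    rcases hp h6 with h | h
    · exact hne h
    · exact h hpw
  · refine ⟨by decide, by decide, by decide⟩
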